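-- pv_equiv track=rewrite | github.com/KorszunKarol/ium | scripts/prepare_nn_data.py | _decide_column_to_drop
-- ===== SOURCE A (Python) =====
-- def _decide_column_to_drop(col1, col2):
--     """Decide which of two correlated columns to drop based on predefined rules"""
--     # Rules for dropping columns (prefer keeping more interpretable/engineered features)
--
--     # Prefer log-transformed over original
--     if 'log' in col1.lower() and 'log' not in col2.lower():
--         return col2
--     elif 'log' in col2.lower() and 'log' not in col1.lower():
--         return col1
--
--     # Prefer total over individual counts
--     if 'total' in col1.lower() and 'total' not in col2.lower():
--         return col2
--     elif 'total' in col2.lower() and 'total' not in col1.lower():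
--         return col1
--
--     # Prefer engineered features over raw features
--     engineered_indicators = ['per_person', 'average', 'count', 'rank', 'distance']
--     col1_engineered = any(indicator in col1.lower() for indicator in engineered_indicators)
--     col2_engineered = any(indicator in col2.lower() for indicator in engineered_indicators)
--
--     if col1_engineered and not col2_engineered:
--         return col2
--     elif col2_engineered and not col1_engineered:
--         return col1
--
--     # Default: drop the one that comes later alphabetically
--     return col2 if col1 < col2 else col1
-- ===== SOURCE B (Python) =====
-- def _decide_column_to_drop(col1, col2):
--     """Decide which of two correlated columns to drop based on predefined rules"""
--     def score(name):
--         n = name.lower()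
--         s = 0
--         for weight, keys in ((4, ('log',)),
--                              (2, ('total',)),
--                              (1, ('per_person', 'average', 'count', 'rank', 'distance'))):
--             if any(k in n for k in keys):
--                 s += weight
--         return s
--     keep = min((col1, col2), key=lambda c: (-score(c), c))
--     return col2 if keep == col1 else col1
-- ===== Notes on version B (the rewrite author's own statement) =====
-- stated objective: alternative
-- what changed: Replaces the three-tier if/elif cascade by accumulating one additive weight score per name in a loop over (weight, keywords) rules and selecting the column to keep with min over the pair keyed by (-score, name), returning the other one.
import Mathlib
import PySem

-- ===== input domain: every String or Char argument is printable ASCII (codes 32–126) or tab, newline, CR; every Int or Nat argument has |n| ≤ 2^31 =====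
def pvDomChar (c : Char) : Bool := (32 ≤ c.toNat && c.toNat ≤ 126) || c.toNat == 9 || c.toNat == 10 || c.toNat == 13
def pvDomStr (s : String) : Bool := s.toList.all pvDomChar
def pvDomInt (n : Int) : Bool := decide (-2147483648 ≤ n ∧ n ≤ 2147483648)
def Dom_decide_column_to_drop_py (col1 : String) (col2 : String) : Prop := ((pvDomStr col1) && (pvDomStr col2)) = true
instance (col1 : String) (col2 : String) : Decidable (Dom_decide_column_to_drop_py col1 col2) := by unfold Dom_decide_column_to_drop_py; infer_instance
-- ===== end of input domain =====

-- B replaces A's three-tier if/elif cascade by a single additive weight score per name and a min-by-key selection of the column to keep (objective: alternative decomposition; same cost).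


-- ===== PORT A =====
-- literal port of A's cascade: log tier, total tier, engineered tier, alphabetical default
def decide_column_to_drop_py (col1 : String) (col2 : String) : String :=
  if PySem.Str.isIn "log" (PySem.Str.lower col1) && !(PySem.Str.isIn "log" (PySem.Str.lower col2)) then col2
  else if PySem.Str.isIn "log" (PySem.Str.lower col2) && !(PySem.Str.isIn "log" (PySem.Str.lower col1)) then col1
  else if PySem.Str.isIn "total" (PySem.Str.lower col1) && !(PySem.Str.isIn "total" (PySem.Str.lower col2)) then col2
  else if PySem.Str.isIn "total" (PySem.Str.lower col2) && !(PySem.Str.isIn "total" (PySem.Str.lower col1)) then col1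
  else
    let engineered_indicators : List String := ["per_person", "average", "count", "rank", "distance"]
    let col1_engineered := engineered_indicators.any (fun ind => PySem.Str.isIn ind (PySem.Str.lower col1))
    let col2_engineered := engineered_indicators.any (fun ind => PySem.Str.isIn ind (PySem.Str.lower col2))
    if col1_engineered && !col2_engineered then col2
    else if col2_engineered && !col1_engineered then col1
    else if col1 < col2 then col2 else col1

-- ===== PORT B =====
-- additive weight score of one name: loop over (weight, keywords) rules accumulating s
def pvScore (name : String) : Int :=
  let n := PySem.Str.lower name
  (([(4, ["log"]), (2, ["total"]),
     (1, ["per_person", "average", "count", "rank", "distance"])] : List (Int × List String)).foldl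
    (fun s wk => if wk.2.any (fun k => PySem.Str.isIn k n) then s + wk.1 else s) 0)

-- Python '<' on the key tuple (-score, name)
def pvKeyLt (a b : Int × String) : Bool := a.1 < b.1 || (a.1 == b.1 && a.2 < b.2)

def decide_column_to_drop_py_alt (col1 : String) (col2 : String) : String :=
  -- min((col1, col2), key=...) keeps the first element on ties
  let keep := if pvKeyLt (-pvScore col2, col2) (-pvScore col1, col1) then col2 else col1
  if keep == col1 then col2 else col1

-- ===== PRECONDITION & SPEC =====
def Spec_decide_column_to_drop_py (col1 : String) (col2 : String) (out : String) : Prop := out = decide_column_to_drop_py_alt col1 col2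
instance (col1 : String) (col2 : String) (out : String) : Decidable (Spec_decide_column_to_drop_py col1 col2 out) := by unfold Spec_decide_column_to_drop_py; infer_instance

-- ===== CLAIM (what is proved, stated in full; the proofs are below) =====
def Claim_equal_decide_column_to_drop_py : Prop := ∀ (col1 : String) (col2 : String), Dom_decide_column_to_drop_py col1 col2 → Spec_decide_column_to_drop_py col1 col2 (decide_column_to_drop_py col1 col2)

-- ===== LEMMAS AND PROOFS =====
set_option maxHeartbeats 1000000

-- the accumulated weight loop equals the sum of the three weighted indicator ifs
theorem pvScore_eq (name : String) :
    pvScore name =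
      (if PySem.Str.isIn "log" (PySem.Str.lower name) then 4 else 0)
      + (if PySem.Str.isIn "total" (PySem.Str.lower name) then 2 else 0)
      + (if (["per_person", "average", "count", "rank", "distance"] : List String).any
            (fun ind => PySem.Str.isIn ind (PySem.Str.lower name)) then 1 else 0) := by
  unfold pvScore
  simp only [List.foldl, List.any_cons, List.any_nil, Bool.or_false]
  split_ifs <;> norm_num

-- ===== VERDICT (by name: the statement is the Claim_ definition above) =====
theorem decide_column_to_drop_py_spec : Claim_equal_decide_column_to_drop_py := by
  intro col1 col2 _
  unfold Spec_decide_column_to_drop_py decide_column_to_drop_py decide_column_to_drop_py_alt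
  rw [pvScore_eq col1, pvScore_eq col2]
  cases h1 : PySem.Str.isIn "log" (PySem.Str.lower col1) <;>
  cases h2 : PySem.Str.isIn "log" (PySem.Str.lower col2) <;>
  cases h3 : PySem.Str.isIn "total" (PySem.Str.lower col1) <;>
  cases h4 : PySem.Str.isIn "total" (PySem.Str.lower col2) <;>
  cases h5 : (["per_person", "average", "count", "rank", "distance"] : List String).any
      (fun ind => PySem.Str.isIn ind (PySem.Str.lower col1)) <;>
  cases h6 : (["per_person", "average", "count", "rank", "distance"] : List String).any
      (fun ind => PySem.Str.isIn ind (PySem.Str.lower col2)) <;>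
  simp only [h1, h2, h3, h4, h5, h6, pvKeyLt, Bool.and_self, Bool.and_true, Bool.and_false,
    Bool.true_and, Bool.false_and, Bool.not_true, Bool.not_false, if_true, if_false,
    Bool.false_or, Bool.or_false, ite_true, ite_false] <;>
  norm_num <;>
  (first
    | rfl
    | (cases hb : col2 == col1 <;> simp_all)
    | (cases hb : col1 == col2 <;> simp_all)
    | (rcases lt_trichotomy col1 col2 with hlt | heq | hgt
       · simp [hlt, lt_asymm hlt, ne_of_lt hlt]
       · subst heq; simp
       · simp [hgt, lt_asymm hgt, ne_of_lt hgt])) <;>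
  (rcases lt_trichotomy col1.toList col2.toList with h | h | h
   · simp [h, le_of_lt h]
   · exact absurd (String.toList_inj.mp h).symm hb
   · simp [not_lt.mpr (le_of_lt h), not_le.mpr h])
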